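-- pv_equiv track=rewrite | github.com/g1tsys/coding | Day 1 - Score 100/566-min_total_diference.py | min_total_difference
-- ===== SOURCE A (Python) =====
-- def min_total_difference(n, d, skills):
--     # 对队伍的实力值进行排序
--     skills.sort()
--
--     # 初始化动态规划数组 dp
--     # dp[i][j] 表示考虑前 i 个队伍中，匹配 j 对时的最小总实力差
--     dp = [[float('inf')] * (n // 2 + 1) for _ in range(n + 1)]
--
--     # 当没有队伍参与时，匹配 0 对的总实力差为 0
--     dp[0][0] = 0
--
--     # 填充动态规划表
--     for i in range(1, n + 1):  # i 表示当前考虑的队伍数量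
--         for j in range(0, i // 2 + 1):  # j 表示匹配的对数
--             # 不匹配第 i 个队伍的情况，继承之前的状态
--             dp[i][j] = dp[i - 1][j]
--
--             # 如果可以匹配并且有足够的队伍进行匹配
--             if i > 1 and j > 0 and skills[i - 1] - skills[i - 2] <= d:
--                 # 更新 dp[i][j]，尝试将第 i-1 和 i-2 组成一对
--                 dp[i][j] = min(dp[i][j], dp[i - 2][j - 1] + skills[i - 1] - skills[i - 2])
--
--     # 寻找能够匹配的最多对数并输出结果
--     for j in range(n // 2, -1, -1):
--         if dp[n][j] < float('inf'):
--             if j == 0: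
--                 return -1
--             return dp[n][j]
--
--     # 如果没有任何队伍可以匹配，返回 -1
--     return -1
-- ===== SOURCE B (Python) =====
-- def min_total_difference(n, d, skills):
--     # 1-D DP over the sorted array with a lexicographic (max pairs, min total diff) state.
--     s = sorted(skills)[:n]
--     prev2 = prev1 = (0, 0)  # best (pairs, total diff) for empty / 1-element prefix
--     for i in range(1, n):
--         diff = s[i] - s[i - 1]
--         cur = prev1
--         if diff <= d:
--             cand = (prev2[0] + 1, prev2[1] + diff)
--             if cand[0] > cur[0] or (cand[0] == cur[0] and cand[1] < cur[1]):
--                 cur = cand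
--         prev2, prev1 = prev1, cur
--     return prev1[1] if prev1[0] > 0 else -1
-- ===== Notes on version B (the rewrite author's own statement) =====
-- stated objective: faster
-- what changed: A fills an (n+1) x (n/2+1) DP table and then scans the last row; B sweeps the sorted array once keeping only a two-cell rolling state ordered lexicographically by (max pairs matched, min total difference).
import Mathlib
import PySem

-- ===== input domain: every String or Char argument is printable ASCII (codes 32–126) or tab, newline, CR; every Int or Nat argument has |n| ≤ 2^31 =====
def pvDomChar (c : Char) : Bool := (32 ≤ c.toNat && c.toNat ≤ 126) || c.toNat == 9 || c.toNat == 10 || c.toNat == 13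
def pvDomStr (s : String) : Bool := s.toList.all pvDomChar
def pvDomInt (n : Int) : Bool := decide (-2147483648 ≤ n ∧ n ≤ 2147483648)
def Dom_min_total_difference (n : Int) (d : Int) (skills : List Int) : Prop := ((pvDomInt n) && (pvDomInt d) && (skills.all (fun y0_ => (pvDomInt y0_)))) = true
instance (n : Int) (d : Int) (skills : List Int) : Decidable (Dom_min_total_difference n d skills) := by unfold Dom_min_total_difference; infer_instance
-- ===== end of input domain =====

-- B replaces A's (n+1)×(n/2+1) DP table by a one-dimensional sweep keeping a lexicographic
-- (max pairs, min total diff) state; objective: faster. A sorts its list argument in place —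
-- the equivalence proved here is about the return value only.

-- ===== PORT A =====
-- float('inf') is modelled as `none : Option Int`; the table only ever holds inf or ints,
-- so `emin`/`eadd` below are exact for Python's min / + on these values.
def emin : Option Int → Option Int → Option Int
  | none, b => b
  | some a, none => some a
  | some a, some b => some (min a b)

-- inf + c = inf; A's `dp[i-2][j-1] + skills[i-1] - skills[i-2]` is grouped as one addition
def eadd : Option Int → Int → Option Int
  | none, _ => none
  | some a, c => some (a + c)

-- dp[i][j] read / write (indices are in range on Pre_, so the defaults are never used)
def get2 (dp : List (List (Option Int))) (i j : Int) : Option Int :=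
  PySem.List.pyGetD (PySem.List.pyGetD dp i []) j none

def set2 (dp : List (List (Option Int))) (i j : Int) (v : Option Int) : List (List (Option Int)) :=
  PySem.List.pySetD dp i (PySem.List.pySetD (PySem.List.pyGetD dp i []) j v)

def min_total_difference (n : Int) (d : Int) (skills : List Int) : Int :=
  let s := PySem.List.sorted skills (fun x => x) false
  let dp : List (List (Option Int)) :=
    List.replicate (n + 1).toNat (List.replicate (PySem.Int.floordiv n 2 + 1).toNat (none : Option Int))
  let dp := set2 dp 0 0 (some 0)
  let dp := (PySem.List.pyRange 1 (n + 1) 1).foldl (fun dp i =>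
    (PySem.List.pyRange 0 (PySem.Int.floordiv i 2 + 1) 1).foldl (fun dp j =>
      let dp := set2 dp i j (get2 dp (i - 1) j)
      if 1 < i ∧ 0 < j ∧ PySem.List.pyGetD s (i - 1) 0 - PySem.List.pyGetD s (i - 2) 0 ≤ d then
        set2 dp i j (emin (get2 dp i j)
          (eadd (get2 dp (i - 2) (j - 1))
            (PySem.List.pyGetD s (i - 1) 0 - PySem.List.pyGetD s (i - 2) 0)))
      else dp) dp) dp
  let res := (PySem.List.pyRange (PySem.Int.floordiv n 2) (-1) (-1)).foldl (fun r j =>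
    match r with
    | some v => some v
    | none =>
      match get2 dp n j with
      | some v => some (if j = 0 then (-1 : Int) else v)
      | none => none) (none : Option Int)
  res.getD (-1)

-- ===== PORT B =====
def min_total_difference_alt (n : Int) (d : Int) (skills : List Int) : Int :=
  let s := PySem.List.slice (PySem.List.sorted skills (fun x => x) false) none (some n)
  let st := (PySem.List.pyRange 1 n 1).foldl
    (fun (st : (Int × Int) × (Int × Int)) i =>
      let diff := PySem.List.pyGetD s i 0 - PySem.List.pyGetD s (i - 1) 0
      let cur := st.2
      let cur := if diff ≤ d then
          let cand := (st.1.1 + 1, st.1.2 + diff)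
          if cur.1 < cand.1 ∨ (cand.1 = cur.1 ∧ cand.2 < cur.2) then cand else cur
        else cur
      (st.2, cur)) (((0 : Int), (0 : Int)), ((0 : Int), (0 : Int)))
  if 0 < st.2.1 then st.2.2 else -1

-- ===== PRECONDITION & SPEC =====
-- Pre_ excludes exactly the inputs where A raises IndexError: negative n (empty dp table),
-- and n ≥ 2 with fewer than n skills (skills[i-1] out of range).
def Pre_min_total_difference (n : Int) (d : Int) (skills : List Int) : Prop :=
  0 ≤ n ∧ (n ≤ skills.length ∨ n = 1)
instance (n : Int) (d : Int) (skills : List Int) : Decidable (Pre_min_total_difference n d skills) := by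
  unfold Pre_min_total_difference; infer_instance

def pvWitness_min_total_difference : Int × Int × List Int := (4, 2, [3, 1, 2, 7])

def Spec_min_total_difference (n : Int) (d : Int) (skills : List Int) (out : Int) : Prop :=
  out = min_total_difference_alt n d skills
instance (n : Int) (d : Int) (skills : List Int) (out : Int) : Decidable (Spec_min_total_difference n d skills out) := by
  unfold Spec_min_total_difference; infer_instance

-- ===== CLAIM (what is proved, stated in full; the proofs are below) =====
def Claim_equal_min_total_difference : Prop := ∀ (n : Int) (d : Int) (skills : List Int), Dom_min_total_difference n d skills → Pre_min_total_difference n d skills → Spec_min_total_difference n d skills (min_total_difference n d skills)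

-- ===== LEMMAS AND PROOFS =====

-- mathematical reading of A's table: Dtab d s i j = dp[i][j]
def Dtab (d : Int) (s : List Int) : Nat → Nat → Option Int
  | 0, j => if j = 0 then some 0 else none
  | 1, j => if j = 0 then some 0 else none
  | (i + 2), j =>
    emin (Dtab d s (i + 1) j)
      (if 0 < j ∧ s.getD (i + 1) 0 - s.getD i 0 ≤ d then
        eadd (Dtab d s i (j - 1)) (s.getD (i + 1) 0 - s.getD i 0)
      else none)

-- mathematical reading of B's sweep state
def bestN (d : Int) (s : List Int) : Nat → Nat × Int
  | 0 => (0, 0)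
  | 1 => (0, 0)
  | (i + 2) =>
    let diff := s.getD (i + 1) 0 - s.getD i 0
    let f1 := bestN d s (i + 1)
    if diff ≤ d then
      let cand := ((bestN d s i).1 + 1, (bestN d s i).2 + diff)
      if f1.1 < cand.1 ∨ (cand.1 = f1.1 ∧ cand.2 < f1.2) then cand else f1
    else f1

theorem emin_none_right (x : Option Int) : emin x none = x := by cases x <;> rfl
theorem emin_eq_none_iff (x y : Option Int) : emin x y = none ↔ x = none ∧ y = none := by
  cases x <;> cases y <;> simp [emin]

theorem Dtab_big (d : Int) (s : List Int) : ∀ i j, i / 2 < j → Dtab d s i j = none := by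
  intro i
  induction i using Nat.twoStepInduction with
  | zero => intro j h; simp [Dtab]; omega
  | one => intro j h; simp [Dtab]; omega
  | more i ih1 ih2 => 
    intro j h
    simp only [Dtab]
    rw [ih2 j (by omega)]
    rw [emin]
    split_ifs with hc
    · rw [ih1 (j-1) (by omega)]; rfl
    · rfl

theorem Dtab_mono (d : Int) (s : List Int) : ∀ i j, Dtab d s i j ≠ none → Dtab d s (i + 1) j ≠ none := by
  intro i j h
  match i with
  | 0 => exact h
  | (i + 1) =>
    simp only [Dtab]
    rw [Ne, emin_eq_none_iff]
    intro ⟨h1, _⟩; exact h h1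

theorem emin_none_left (x : Option Int) : emin none x = x := rfl

theorem Dtab_step_ne (d : Int) (s : List Int) : ∀ i j, Dtab d s (i + 1) j ≠ none →
    Dtab d s i j ≠ none ∨ (0 < j ∧ Dtab d s i (j - 1) ≠ none) := by
  intro i j h
  match i with
  | 0 => left; simpa [Dtab] using h
  | (i' + 1) =>
    simp only [Dtab] at h
    rw [Ne, emin_eq_none_iff] at h
    push_neg at h
    by_cases h1 : Dtab d s (i' + 1) j = none
    · right
      have h2 := h h1
      split_ifs at h2 with hc
      · refine ⟨hc.1, ?_⟩
        intro hn
        apply h2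
        by_cases h3 : Dtab d s i' (j - 1) = none
        · rw [h3]; rfl
        · exact absurd hn (Dtab_mono d s i' (j - 1) h3)
      · exact absurd rfl h2
    · left; exact h1

theorem bestN_inv (d : Int) (s : List Int) : ∀ i,
    Dtab d s i (bestN d s i).1 = some (bestN d s i).2 ∧
    ∀ j, (bestN d s i).1 < j → Dtab d s i j = none := by
  intro i
  induction i using Nat.twoStepInduction with
  | zero => refine ⟨by simp [bestN, Dtab], fun j hj => ?_⟩; simp [bestN] at hj; simp [Dtab]; omega
  | one => refine ⟨by simp [bestN, Dtab], fun j hj => ?_⟩; simp [bestN] at hj; simp [Dtab]; omega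
  | more i ih1 ih2 =>
    obtain ⟨h2v, h2n⟩ := ih1
    obtain ⟨h1v, h1n⟩ := ih2
    set c := s.getD (i + 1) 0 - s.getD i 0 with hc
    set p2 := (bestN d s i).1 with hp2
    set m2 := (bestN d s i).2 with hm2
    set p1 := (bestN d s (i + 1)).1 with hp1
    set m1 := (bestN d s (i + 1)).2 with hm1
    have hp21 : p2 ≤ p1 := by
      by_contra hlt
      exact (Dtab_mono d s i p2 (by rw [h2v]; simp)) (h1n p2 (by omega))
    have hp12 : p1 ≤ p2 + 1 := by
      rcases Dtab_step_ne d s i p1 (by rw [h1v]; simp) with h | ⟨hj, h⟩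
      · have : ¬ (p1 > p2) := fun hgt => h (h2n p1 hgt)
        omega
      · have : ¬ (p1 - 1 > p2) := fun hgt => h (h2n (p1 - 1) hgt)
        omega
    have hbest : bestN d s (i + 2) =
        if c ≤ d then
          (if p1 < p2 + 1 ∨ (p2 + 1 = p1 ∧ m2 + c < m1) then (p2 + 1, m2 + c) else (p1, m1))
        else (p1, m1) := by
      simp only [bestN]
      rfl
    have hDtop : ∀ j, p2 + 1 < j → p1 < j → Dtab d s (i + 2) j = none := by
      intro j hj2 hj1
      simp only [Dtab]
      rw [h1n j hj1, emin_none_left, h2n (j - 1) (by omega)]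
      split_ifs <;> rfl
    have hDval : ∀ j, 0 < j → j = p2 + 1 →
        Dtab d s (i + 2) j = emin (Dtab d s (i + 1) j) (if c ≤ d then some (m2 + c) else none) := by
      intro j hj0 hjp
      simp only [Dtab, ← hc]
      subst hjp
      rw [show p2 + 1 - 1 = p2 from rfl, h2v]
      congr 1
      split_ifs with h1 h2 h2 <;> first | rfl | (exfalso; omega)
    rw [hbest]
    by_cases hcd : c ≤ d
    · simp only [if_pos hcd]
      by_cases hA : p1 < p2 + 1 ∨ (p2 + 1 = p1 ∧ m2 + c < m1)
      · simp only [if_pos hA]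
        constructor
        · show Dtab d s (i + 2) (p2 + 1) = some (m2 + c)
          rw [hDval (p2 + 1) (by omega) rfl, if_pos hcd]
          rcases hA with h | ⟨heq, hlt⟩
          · rw [h1n (p2 + 1) (by omega), emin_none_left]
          · rw [← heq] at h1v
            rw [h1v, emin]
            simp [min_eq_right (le_of_lt hlt)]
        · intro j hj
          exact hDtop j hj (by omega)
      · simp only [if_neg hA]
        push_neg at hA
        obtain ⟨hA1, hA2⟩ := hA
        have hpe : p1 = p2 + 1 := by omega
        have hge : m1 ≤ m2 + c := hA2 hpe.symm
        constructor
        · show Dtab d s (i + 2) p1 = some m1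
          rw [hDval p1 (by omega) hpe, if_pos hcd, h1v, emin]
          simp [min_eq_left hge]
        · intro j hj
          exact hDtop j (by omega) hj
    · simp only [if_neg hcd]
      constructor
      · show Dtab d s (i + 2) p1 = some m1
        simp only [Dtab, ← hc]
        rw [h1v]
        have : ¬ (0 < p1 ∧ c ≤ d) := fun h => hcd h.2
        rw [if_neg this, emin_none_right]
      · intro j hj
        simp only [Dtab, ← hc]
        rw [h1n j hj, emin_none_left]
        rw [if_neg (fun h => hcd h.2)]

-- ===== table layer =====
def blankR (cols : Nat) : List (Option Int) := List.replicate cols none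
def rowD (d : Int) (s : List Int) (cols i : Nat) : List (Option Int) := (List.range cols).map (Dtab d s i)
def rowP (d : Int) (s : List Int) (cols i j : Nat) : List (Option Int) :=
  (List.range cols).map (fun jj => if jj < j then Dtab d s i jj else none)
def tblF (d : Int) (s : List Int) (m cols k : Nat) : List (List (Option Int)) :=
  (List.range (m + 1)).map (fun r => if r ≤ k then rowD d s cols r else blankR cols)
def tblP (d : Int) (s : List Int) (m cols i j : Nat) : List (List (Option Int)) :=
  (List.range (m + 1)).map (fun r =>
    if r < i then rowD d s cols r else if r = i then rowP d s cols i j else blankR cols)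

theorem set_map_range {α : Type} (k : Nat) (f : Nat → α) (r : Nat) (v : α) :
    ((List.range k).map f).set r v = (List.range k).map (fun x => if x = r then v else f x) := by
  apply List.ext_getElem
  · simp
  · intro i h1 h2
    simp only [List.getElem_set, List.getElem_map, List.getElem_range]
    rcases eq_or_ne r i with h | h
    · simp [h]
    · simp [h, h.symm]

theorem map_range_ext {α : Type} (k : Nat) (f g : Nat → α) (h : ∀ x, x < k → f x = g x) :
    (List.range k).map f = (List.range k).map g :=
  List.map_congr_left fun x hx => h x (List.mem_range.mp hx)

theorem getD_map_range' {α : Type} (k : Nat) (f : Nat → α) (r : Nat) (dflt : α) (h : r < k) :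
    ((List.range k).map f).getD r dflt = f r := PySem.List.getD_map_range f k r dflt h

theorem get2_map_range (g : Nat → List (Option Int)) (k r j : Nat) (hr : r < k) :
    get2 ((List.range k).map g) (r : Int) (j : Int) = (g r).getD j none := by
  unfold get2
  rw [PySem.List.pyGetD_natCast, PySem.List.pyGetD_natCast, getD_map_range' k g r [] hr]

theorem set2_map_range (g : Nat → List (Option Int)) (k r j : Nat) (v : Option Int) (hr : r < k) :
    set2 ((List.range k).map g) (r : Int) (j : Int) v =
      (List.range k).map (fun x => if x = r then (g r).set j v else g x) := by
  simp only [set2, PySem.List.pySetD_natCast, PySem.List.pyGetD_natCast,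
    getD_map_range' k g r [] hr]
  exact set_map_range k g r _

theorem rowP_set (d : Int) (s : List Int) (cols i j : Nat) (v : Option Int) :
    (rowP d s cols i j).set j v =
      (List.range cols).map (fun jj => if jj = j then v else if jj < j then Dtab d s i jj else none) := by
  unfold rowP
  exact set_map_range cols _ j v

theorem innerA_step (d : Int) (s : List Int) (m cols i j : Nat)
    (hcols : cols = m / 2 + 1) (hi1 : 1 ≤ i) (him : i ≤ m) (hj : j ≤ i / 2) :
    (let dp := set2 (tblP d s m cols i j) (i : Int) (j : Int)
        (get2 (tblP d s m cols i j) ((i : Int) - 1) (j : Int));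
     if 1 < (i : Int) ∧ 0 < (j : Int) ∧
         PySem.List.pyGetD s ((i : Int) - 1) 0 - PySem.List.pyGetD s ((i : Int) - 2) 0 ≤ d then
       set2 dp (i : Int) (j : Int) (emin (get2 dp (i : Int) (j : Int))
         (eadd (get2 dp ((i : Int) - 2) ((j : Int) - 1))
           (PySem.List.pyGetD s ((i : Int) - 1) 0 - PySem.List.pyGetD s ((i : Int) - 2) 0)))
     else dp) = tblP d s m cols i (j + 1) := by
  have hjc : j < cols := by
    have h2 : i / 2 ≤ m / 2 := Nat.div_le_div_right him
    omega
  have him1 : i < m + 1 := by omega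
  have hc1 : ((i : Int) - 1) = ((i - 1 : Nat) : Int) := by omega
  have hread1 : get2 (tblP d s m cols i j) ((i : Int) - 1) (j : Int) = Dtab d s (i - 1) j := by
    rw [hc1]
    unfold tblP
    rw [get2_map_range _ (m + 1) (i - 1) j (by omega)]
    rw [if_pos (by omega)]
    exact getD_map_range' cols _ j none hjc
  rw [hread1]
  have hset1 : set2 (tblP d s m cols i j) (i : Int) (j : Int) (Dtab d s (i - 1) j) =
      (List.range (m + 1)).map (fun x => if x = i then
          (List.range cols).map (fun jj => if jj = j then Dtab d s (i - 1) j else if jj < j then Dtab d s i jj else none)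
        else if x < i then rowD d s cols x else if x = i then rowP d s cols i j else blankR cols) := by
    unfold tblP
    rw [set2_map_range _ (m + 1) i j _ him1]
    apply map_range_ext
    intro x hx
    rcases eq_or_ne x i with h | h
    · subst h
      rw [if_pos rfl, if_pos rfl, if_neg (by omega), if_pos rfl]
      exact rowP_set d s cols x j _
    · simp [h]
  rw [hset1]
  set rowQ := (List.range cols).map (fun jj => if jj = j then Dtab d s (i - 1) j else if jj < j then Dtab d s i jj else none) with hrowQ
  by_cases hcond : 1 < (i : Int) ∧ 0 < (j : Int) ∧
      PySem.List.pyGetD s ((i : Int) - 1) 0 - PySem.List.pyGetD s ((i : Int) - 2) 0 ≤ d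
  · rw [if_pos hcond]
    obtain ⟨hi2, hj1, hcd⟩ := hcond
    have hi2' : 2 ≤ i := by omega
    have hj1' : 1 ≤ j := by omega
    have hc2 : ((i : Int) - 2) = ((i - 2 : Nat) : Int) := by omega
    have hcj : ((j : Int) - 1) = ((j - 1 : Nat) : Int) := by omega
    rw [hc1, hc2, PySem.List.pyGetD_natCast, PySem.List.pyGetD_natCast] at hcd ⊢
    have hreadii : get2 ((List.range (m + 1)).map (fun x => if x = i then rowQ
        else if x < i then rowD d s cols x else if x = i then rowP d s cols i j else blankR cols))
        (i : Int) (j : Int) = Dtab d s (i - 1) j := by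
      rw [get2_map_range _ (m + 1) i j him1, if_pos rfl, hrowQ]
      rw [getD_map_range' cols _ j none hjc, if_pos rfl]
    have hread2 : get2 ((List.range (m + 1)).map (fun x => if x = i then rowQ
        else if x < i then rowD d s cols x else if x = i then rowP d s cols i j else blankR cols))
        ((i - 2 : Nat) : Int) ((j : Int) - 1) = Dtab d s (i - 2) (j - 1) := by
      rw [hcj, get2_map_range _ (m + 1) (i - 2) (j - 1) (by omega)]
      rw [if_neg (by omega), if_pos (by omega)]
      exact getD_map_range' cols _ (j - 1) none (by omega)
    rw [hreadii, hread2]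
    have hval : emin (Dtab d s (i - 1) j)
        (eadd (Dtab d s (i - 2) (j - 1)) (s.getD (i - 1) 0 - s.getD (i - 2) 0)) = Dtab d s i j := by
      have hie : i = (i - 2) + 2 := by omega
      conv_rhs => rw [hie]
      simp only [Dtab]
      have h1 : i - 2 + 1 = i - 1 := by omega
      rw [h1, if_pos ⟨hj1', hcd⟩]
    rw [hval]
    rw [set2_map_range _ (m + 1) i j _ him1, if_pos rfl]
    unfold tblP
    apply map_range_ext
    intro x hx
    rcases eq_or_ne x i with h | h
    · subst h
      rw [if_pos rfl, if_neg (by omega), if_pos rfl, hrowQ]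
      rw [set_map_range]
      apply map_range_ext
      intro jj hjj
      split_ifs <;> first | rfl | omega | simp_all
    · simp [h]
  · rw [if_neg hcond]
    have hDeq : Dtab d s (i - 1) j = Dtab d s i j := by
      rcases Nat.lt_or_ge i 2 with h1 | h2
      · have hi1' : i = 1 := by omega
        subst hi1'
        simp [Dtab]
      · have hnc : ¬ (0 < j ∧ s.getD (i - 1) 0 - s.getD (i - 2) 0 ≤ d) := by
          rintro ⟨ha, hb⟩
          apply hcond
          refine ⟨by omega, by omega, ?_⟩
          have hc2 : ((i : Int) - 2) = ((i - 2 : Nat) : Int) := by omega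
          rw [hc1, hc2, PySem.List.pyGetD_natCast, PySem.List.pyGetD_natCast]
          exact hb
        have hie : i = (i - 2) + 2 := by omega
        conv_rhs => rw [hie]
        simp only [Dtab]
        have h1 : i - 2 + 1 = i - 1 := by omega
        rw [h1, if_neg hnc, emin_none_right]
    unfold tblP
    apply map_range_ext
    intro x hx
    rcases eq_or_ne x i with h | h
    · subst h
      rw [if_pos rfl, if_neg (by omega), if_pos rfl, hrowQ]
      apply map_range_ext
      intro jj hjj
      split_ifs <;> first | rfl | omega | simp_all
    · simp [h]

theorem rowP_zero (d : Int) (s : List Int) (cols i : Nat) : rowP d s cols i 0 = blankR cols := by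
  unfold rowP blankR
  apply List.ext_getElem <;> simp

theorem tblP_zero_eq (d : Int) (s : List Int) (m cols k : Nat) (hk : 1 ≤ k) :
    tblP d s m cols k 0 = tblF d s m cols (k - 1) := by
  unfold tblP tblF
  apply map_range_ext
  intro r hr
  rcases Nat.lt_or_ge r k with h | h
  · rw [if_pos h, if_pos (show r ≤ k - 1 by omega)]
  · rw [if_neg (show ¬ r < k by omega)]
    rcases eq_or_ne r k with hh | hh
    · subst hh; rw [if_pos rfl, if_neg (show ¬ r ≤ r - 1 by omega), rowP_zero]
    · rw [if_neg hh, if_neg (show ¬ r ≤ k - 1 by omega)]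

theorem tblP_full_eq (d : Int) (s : List Int) (m cols k : Nat) (hcols : cols = m / 2 + 1) :
    tblP d s m cols k (k / 2 + 1) = tblF d s m cols k := by
  unfold tblP tblF
  apply map_range_ext
  intro r hr
  rcases Nat.lt_or_ge r k with h | h
  · rw [if_pos h, if_pos (show r ≤ k by omega)]
  · rcases eq_or_ne r k with hh | hh
    · subst hh; rw [if_neg (show ¬ r < r by omega), if_pos rfl, if_pos le_rfl]
      unfold rowP rowD
      apply map_range_ext
      intro jj hjj
      rcases Nat.lt_or_ge jj (r / 2 + 1) with h1 | h1
      · rw [if_pos h1]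
      · rw [if_neg (show ¬ jj < r / 2 + 1 by omega), Dtab_big d s r jj (by omega)]
    · rw [if_neg (show ¬ r < k by omega), if_neg hh, if_neg (show ¬ r ≤ k by omega)]

theorem innerFold (d : Int) (s : List Int) (m cols k : Nat)
    (hcols : cols = m / 2 + 1) (hk1 : 1 ≤ k) (hkm : k ≤ m) :
    ∀ t, t ≤ k / 2 + 1 →
    (PySem.List.pyRange 0 (t : Int) 1).foldl (fun dp j =>
      let dp := set2 dp (k : Int) j (get2 dp ((k : Int) - 1) j)
      if 1 < (k : Int) ∧ 0 < j ∧
          PySem.List.pyGetD s ((k : Int) - 1) 0 - PySem.List.pyGetD s ((k : Int) - 2) 0 ≤ d then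
        set2 dp (k : Int) j (emin (get2 dp (k : Int) j)
          (eadd (get2 dp ((k : Int) - 2) (j - 1))
            (PySem.List.pyGetD s ((k : Int) - 1) 0 - PySem.List.pyGetD s ((k : Int) - 2) 0)))
      else dp) (tblP d s m cols k 0) = tblP d s m cols k t := by
  intro t
  induction t with
  | zero => intro _; rw [PySem.List.pyRange_one_eq_nil (by omega)]; rfl
  | succ t ih =>
    intro ht
    have hc : ((t + 1 : Nat) : Int) = (t : Int) + 1 := by push_cast; ring
    rw [hc, PySem.List.pyRange_one_succ_right (by omega), List.foldl_append, ih (by omega)]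
    simp only [List.foldl_cons, List.foldl_nil]
    exact innerA_step d s m cols k t hcols hk1 hkm (by omega)

theorem outerFold (d : Int) (s : List Int) (m cols : Nat) (hcols : cols = m / 2 + 1) :
    ∀ k, k ≤ m →
    (PySem.List.pyRange 1 ((k : Nat) + 1 : Int) 1).foldl (fun dp i =>
      (PySem.List.pyRange 0 (PySem.Int.floordiv i 2 + 1) 1).foldl (fun dp j =>
        let dp := set2 dp i j (get2 dp (i - 1) j)
        if 1 < i ∧ 0 < j ∧
            PySem.List.pyGetD s (i - 1) 0 - PySem.List.pyGetD s (i - 2) 0 ≤ d then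
          set2 dp i j (emin (get2 dp i j)
            (eadd (get2 dp (i - 2) (j - 1))
              (PySem.List.pyGetD s (i - 1) 0 - PySem.List.pyGetD s (i - 2) 0)))
        else dp) dp) (tblF d s m cols 0) = tblF d s m cols k := by
  intro k
  induction k with
  | zero => intro _; rw [show ((0 : Nat) + 1 : Int) = 1 by norm_num, PySem.List.pyRange_one_eq_nil (by omega)]; rfl
  | succ k ih =>
    intro hk
    have hc : ((k + 1 : Nat) + 1 : Int) = ((k : Nat) + 1 : Int) + 1 := by push_cast; ring
    rw [hc, PySem.List.pyRange_one_succ_right (by omega), List.foldl_append, ih (by omega)]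
    rw [List.foldl_cons, List.foldl_nil]
    simp only []
    have hc3 : ((k : Nat) + 1 : Int) = (((k + 1 : Nat) : Int)) := by push_cast; ring
    rw [hc3]
    have hfd : PySem.Int.floordiv (((k + 1 : Nat) : Int)) 2 = (((k + 1) / 2 : Nat) : Int) :=
      by exact_mod_cast PySem.Int.floordiv_natCast (k + 1) 2
    rw [hfd]
    have hc2 : ((((k + 1) / 2 : Nat) : Int) + 1) = ((((k + 1) / 2 + 1 : Nat)) : Int) := by push_cast; ring
    rw [hc2]
    have h0 : tblF d s m cols k = tblP d s m cols (k + 1) 0 := by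
      rw [tblP_zero_eq d s m cols (k + 1) (by omega)]
      rfl
    rw [h0]

    exact (innerFold d s m cols (k + 1) hcols (by omega) (by omega) ((k + 1) / 2 + 1)
      (by omega)).trans (tblP_full_eq d s m cols (k + 1) hcols)

theorem initTbl (d : Int) (s : List Int) (m cols : Nat) (hc : 1 ≤ cols) :
    set2 (List.replicate (m + 1) (List.replicate cols (none : Option Int))) 0 0 (some 0) =
      tblF d s m cols 0 := by
  have h00 : ∀ (dp : List (List (Option Int))) (v : Option Int),
      set2 dp 0 0 v = dp.set 0 ((dp.getD 0 []).set 0 v) := by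
    intro dp v
    simp [set2, pysem]
  rw [h00]
  unfold tblF
  apply List.ext_getElem
  · simp
  · intro r h1 h2
    simp only [List.length_set, List.length_replicate] at h1
    rw [List.getElem_map, List.getElem_range, List.getElem_set]
    rcases eq_or_ne r 0 with h | h
    · subst h
      rw [if_pos rfl, if_pos le_rfl]
      have hgd : (List.replicate (m + 1) (List.replicate cols (none : Option Int))).getD 0 [] =
          List.replicate cols (none : Option Int) := by
        simp [List.getD]
      rw [hgd]
      unfold rowD
      apply List.ext_getElem
      · simp
      · intro jj hh1 hh2
        simp only [List.length_set, List.length_replicate] at hh1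
        rw [List.getElem_map, List.getElem_range, List.getElem_set]
        rcases eq_or_ne jj 0 with hj | hj
        · subst hj; rw [if_pos rfl]; rfl
        · rw [if_neg (fun hx => hj hx.symm), List.getElem_replicate, Dtab]
          rw [if_neg hj]
    · rw [if_neg (show (0 : Nat) ≠ r from fun hx => h hx.symm),
        if_neg (show ¬ r ≤ 0 by omega), List.getElem_replicate]
      rfl

theorem foldl_scan_some {f : Option Int → Int → Option Int}
    (hf : ∀ v j, f (some v) j = some v) :
    ∀ (l : List Int) (v : Int), l.foldl f (some v) = some v := by
  intro l
  induction l with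
  | nil => intro v; rfl
  | cons x xs ih => intro v; rw [List.foldl_cons, hf]; exact ih v

theorem get2_tblF (d : Int) (s : List Int) (m cols r j k : Nat)
    (hr : r ≤ k) (hrm : r < m + 1) (hj : j < cols) :
    get2 (tblF d s m cols k) (r : Int) (j : Int) = Dtab d s r j := by
  unfold tblF
  rw [get2_map_range _ (m + 1) r j hrm, if_pos hr]
  unfold rowD
  exact getD_map_range' cols _ j none hj

theorem scanFold (d : Int) (s : List Int) (m cols : Nat) (hcols : cols = m / 2 + 1)
    (p : Nat) (M : Int) (hp : Dtab d s m p = some M)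
    (hpn : ∀ j, p < j → Dtab d s m j = none) :
    ∀ t : Nat, p ≤ t → t < cols →
    (PySem.List.pyRange (t : Int) (-1) (-1)).foldl (fun r j =>
      match r with
      | some v => some v
      | none =>
        match get2 (tblF d s m cols m) (m : Int) j with
        | some v => some (if j = 0 then (-1 : Int) else v)
        | none => none) (none : Option Int) = some (if p = 0 then (-1 : Int) else M) := by
  intro t
  induction t with
  | zero =>
    intro hpt htc
    have hp0 : p = 0 := by omega
    rw [PySem.List.pyRange_neg_one_cons (by norm_num)]
    rw [show (((0 : Nat) : Int) - 1) = -1 by simp, PySem.List.pyRange_neg_one_eq_nil (by norm_num)]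
    rw [List.foldl_cons, List.foldl_nil]
    have hg : get2 (tblF d s m cols m) (m : Int) ((0 : Nat) : Int) = Dtab d s m 0 :=
      get2_tblF d s m cols m 0 m le_rfl (by omega) (by omega)
    simp only [hg, hp0] at hp ⊢
    rw [hp]
    simp
  | succ t ih =>
    intro hpt htc
    rw [show ((t + 1 : Nat) : Int) = ((t : Nat) : Int) + 1 by push_cast; ring]
    rw [PySem.List.pyRange_neg_one_cons (by omega)]
    rw [show ((t : Nat) : Int) + 1 - 1 = ((t : Nat) : Int) by ring]
    rw [List.foldl_cons]
    have hg : get2 (tblF d s m cols m) (m : Int) (((t : Nat) : Int) + 1) = Dtab d s m (t + 1) := by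
      rw [show ((t : Nat) : Int) + 1 = ((t + 1 : Nat) : Int) by push_cast; ring]
      exact get2_tblF d s m cols m (t + 1) m le_rfl (by omega) (by omega)
    rcases Nat.eq_or_lt_of_le hpt with he | hlt
    · simp only [hg, ← he, hp]
      rw [foldl_scan_some (fun v j => rfl)]
      have : ¬ ((t : Nat) : Int) + 1 = 0 := by omega
      rw [if_neg this, if_neg (by omega : ¬ p = 0)]
    · simp only [hg, hpn (t + 1) (by omega)]
      exact ih (by omega) (by omega)

theorem bestN_congr (d : Int) (s1 s2 : List Int) (m : Nat)
    (h : ∀ x, x < m → s1.getD x 0 = s2.getD x 0) : ∀ i, i ≤ m → bestN d s1 i = bestN d s2 i := by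
  intro i
  induction i using Nat.twoStepInduction with
  | zero => intro _; rfl
  | one => intro _; rfl
  | more i ih1 ih2 =>
    intro him
    simp only [bestN]
    rw [h (i + 1) (by omega), h i (by omega), ih1 (by omega), ih2 (by omega)]

theorem foldB (d : Int) (s' : List Int) :
    ∀ k : Nat, 1 ≤ k →
    (PySem.List.pyRange 1 (k : Int) 1).foldl (fun (st : (Int × Int) × (Int × Int)) i =>
      let diff := PySem.List.pyGetD s' i 0 - PySem.List.pyGetD s' (i - 1) 0
      let cur := st.2
      let cur := if diff ≤ d then
          let cand := (st.1.1 + 1, st.1.2 + diff)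
          if cur.1 < cand.1 ∨ (cand.1 = cur.1 ∧ cand.2 < cur.2) then cand else cur
        else cur
      (st.2, cur)) (((0 : Int), (0 : Int)), ((0 : Int), (0 : Int))) =
    ((((bestN d s' (k - 1)).1 : Int), (bestN d s' (k - 1)).2),
     (((bestN d s' k).1 : Int), (bestN d s' k).2)) := by
  intro k
  induction k with
  | zero => intro h; omega
  | succ k ih =>
    intro _
    rcases Nat.eq_zero_or_pos k with hk0 | hk1
    · subst hk0
      rw [show ((1 : Nat) : Int) = 1 by norm_num, PySem.List.pyRange_one_eq_nil le_rfl]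
      rfl
    · rw [show ((k + 1 : Nat) : Int) = ((k : Nat) : Int) + 1 by push_cast; ring]
      rw [PySem.List.pyRange_one_succ_right (by omega), List.foldl_append, ih hk1]
      rw [List.foldl_cons, List.foldl_nil]
      simp only []
      rw [PySem.List.pyGetD_natCast]
      rw [show ((k : Nat) : Int) - 1 = ((k - 1 : Nat) : Int) by omega]
      rw [PySem.List.pyGetD_natCast]
      set c := s'.getD k 0 - s'.getD (k - 1) 0 with hcdef
      set b2 := bestN d s' (k - 1) with hb2
      set b1 := bestN d s' k with hb1
      have hbe : bestN d s' (k + 1) =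
          if c ≤ d then
            (if b1.1 < b2.1 + 1 ∨ (b2.1 + 1 = b1.1 ∧ b2.2 + c < b1.2)
             then (b2.1 + 1, b2.2 + c) else b1)
          else b1 := by
        rw [show k + 1 = (k - 1) + 2 by omega]
        simp only [bestN]
        rw [show k - 1 + 1 = k by omega]
      have hfst : k + 1 - 1 = k := rfl
      rw [hfst, hbe]
      by_cases hd1 : c ≤ d
      · rw [if_pos hd1, if_pos hd1]
        have hiff : ((((b1.1 : Nat) : Int) < ((b2.1 : Nat) : Int) + 1 ∨
            (((b2.1 : Nat) : Int) + 1 = ((b1.1 : Nat) : Int) ∧ b2.2 + c < b1.2)) ↔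
            (b1.1 < b2.1 + 1 ∨ (b2.1 + 1 = b1.1 ∧ b2.2 + c < b1.2))) := by
          constructor <;> intro h <;> rcases h with h | ⟨h1, h2⟩
          · left; omega
          · right; exact ⟨by omega, h2⟩
          · left; omega
          · right; exact ⟨by omega, h2⟩
        by_cases hd2 : b1.1 < b2.1 + 1 ∨ (b2.1 + 1 = b1.1 ∧ b2.2 + c < b1.2)
        · rw [if_pos (hiff.mpr hd2), if_pos hd2]
          refine Prod.ext rfl (Prod.ext ?_ rfl)
          show ((b2.1 : Nat) : Int) + 1 = (((b2.1 + 1 : Nat)) : Int)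
          push_cast; ring
        · rw [if_neg (fun h => hd2 (hiff.mp h)), if_neg hd2]
      · rw [if_neg hd1, if_neg hd1]

theorem portA_eval (d : Int) (skills : List Int) (m : Nat) :
    min_total_difference (m : Int) d skills =
      (if (bestN d (PySem.List.sorted skills (fun x => x) false) m).1 = 0 then (-1 : Int)
       else (bestN d (PySem.List.sorted skills (fun x => x) false) m).2) := by
  set s := PySem.List.sorted skills (fun x => x) false with hs
  obtain ⟨hpv, hpn⟩ := bestN_inv d s m
  set p := (bestN d s m).1 with hp
  set M := (bestN d s m).2 with hM
  have hple : p ≤ m / 2 := by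
    by_contra hgt
    rw [Dtab_big d s m p (by omega)] at hpv
    simp at hpv
  have h0 : min_total_difference (m : Int) d skills =
      ((PySem.List.pyRange (PySem.Int.floordiv (m : Int) 2) (-1) (-1)).foldl (fun r j =>
        match r with
        | some v => some v
        | none =>
          match get2 ((PySem.List.pyRange 1 ((m : Int) + 1) 1).foldl (fun dp i =>
              (PySem.List.pyRange 0 (PySem.Int.floordiv i 2 + 1) 1).foldl (fun dp j =>
                let dp := set2 dp i j (get2 dp (i - 1) j)
                if 1 < i ∧ 0 < j ∧ PySem.List.pyGetD s (i - 1) 0 - PySem.List.pyGetD s (i - 2) 0 ≤ d then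
                  set2 dp i j (emin (get2 dp i j) (eadd (get2 dp (i - 2) (j - 1))
                    (PySem.List.pyGetD s (i - 1) 0 - PySem.List.pyGetD s (i - 2) 0)))
                else dp) dp)
              (set2 (List.replicate ((m : Int) + 1).toNat
                (List.replicate (PySem.Int.floordiv (m : Int) 2 + 1).toNat (none : Option Int))) 0 0 (some 0)))
            (m : Int) j with
          | some v => some (if j = 0 then (-1 : Int) else v)
          | none => none) (none : Option Int)).getD (-1) := rfl
  have hfd : PySem.Int.floordiv (m : Int) 2 = ((m / 2 : Nat) : Int) := by
    rw [PySem.Int.floordiv_eq_ediv_of_pos (by norm_num)]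
    omega
  rw [hfd] at h0
  rw [show (((m : Int)) + 1).toNat = m + 1 by omega] at h0
  rw [show ((((m / 2 : Nat) : Int)) + 1).toNat = m / 2 + 1 by omega] at h0
  rw [initTbl d s m (m / 2 + 1) (by omega)] at h0
  rw [outerFold d s m (m / 2 + 1) rfl m le_rfl] at h0
  rw [scanFold d s m (m / 2 + 1) rfl p M hpv hpn (m / 2) hple (by omega)] at h0
  rw [h0, Option.getD_some]

theorem getD_take (s : List Int) (m x : Nat) (hx : x < m) :
    (List.take m s).getD x 0 = s.getD x 0 := by
  simp [List.getD, List.getElem?_take, hx]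

theorem portB_eval (d : Int) (skills : List Int) (m : Nat) :
    min_total_difference_alt (m : Int) d skills =
      (if 0 < ((bestN d (PySem.List.sorted skills (fun x => x) false) m).1 : Int)
       then (bestN d (PySem.List.sorted skills (fun x => x) false) m).2 else -1) := by
  set s := PySem.List.sorted skills (fun x => x) false with hs
  have h0 : min_total_difference_alt (m : Int) d skills =
      (let st := (PySem.List.pyRange 1 ((m : Nat) : Int) 1).foldl
        (fun (st : (Int × Int) × (Int × Int)) i =>
          let diff := PySem.List.pyGetD (PySem.List.slice s none (some ((m : Nat) : Int))) i 0 -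
            PySem.List.pyGetD (PySem.List.slice s none (some ((m : Nat) : Int))) (i - 1) 0
          let cur := st.2
          let cur := if diff ≤ d then
              let cand := (st.1.1 + 1, st.1.2 + diff)
              if cur.1 < cand.1 ∨ (cand.1 = cur.1 ∧ cand.2 < cur.2) then cand else cur
            else cur
          (st.2, cur)) (((0 : Int), (0 : Int)), ((0 : Int), (0 : Int)))
       if 0 < st.2.1 then st.2.2 else -1) := rfl
  have hsl : PySem.List.slice s none (some ((m : Nat) : Int)) = List.take m s := by
    exact PySem.List.slice_to_natCast s m
  have hcongr : bestN d (List.take m s) m = bestN d s m :=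
    bestN_congr d (List.take m s) s m (fun x hx => getD_take s m x hx) m le_rfl
  rcases Nat.eq_zero_or_pos m with hm0 | hm1
  · subst hm0
    rw [PySem.List.pyRange_one_eq_nil (by norm_num)] at h0
    rw [h0]
    simp [bestN]
  · rw [hsl] at h0
    rw [foldB d (List.take m s) m hm1] at h0
    rw [h0]
    simp only [hcongr]

theorem main_eq (n d : Int) (skills : List Int) (hn : 0 ≤ n) :
    min_total_difference n d skills = min_total_difference_alt n d skills := by
  obtain ⟨m, rfl⟩ : ∃ m : Nat, n = (m : Int) := ⟨n.toNat, (Int.toNat_of_nonneg hn).symm⟩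
  rw [portA_eval d skills m, portB_eval d skills m]
  by_cases hp : (bestN d (PySem.List.sorted skills (fun x => x) false) m).1 = 0
  · rw [if_pos hp, if_neg (show ¬ (0:Int) < ((bestN d (PySem.List.sorted skills (fun x => x) false) m).1 : Int) by omega)]
  · rw [if_neg hp, if_pos (show (0:Int) < ((bestN d (PySem.List.sorted skills (fun x => x) false) m).1 : Int) by omega)]

-- ===== VERDICT (by name: the statement is the Claim_ definition above) =====
theorem min_total_difference_spec : Claim_equal_min_total_difference := by
  intro n d skills _ hPre
  unfold Spec_min_total_difference
  exact main_eq n d skills hPre.1
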